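-- pv_equiv track=rewrite | github.com/tarsit6775/tars | hands/cdp.py | _pick_page
-- ===== SOURCE A (Python) =====
-- def _pick_page(tabs):
--     """Pick the best page target from target list.
--
--     Priority: blank/simple tabs > any page tab > any ws target.
--     Avoids picking tabs on heavy travel sites that might be stuck loading.
--     """
--     page_tabs = [t for t in tabs if t.get("type") == "page" and t.get("webSocketDebuggerUrl")]
--
--     # Prefer blank/new tabs (least likely to be stuck)
--     for t in page_tabs:
--         url = t.get("url", "")
--         if "about:blank" in url or "chrome://newtab" in url or "chrome-untrusted:" in url:
--             return t
--
--     # Then prefer any simple page over heavy travel sites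
--     heavy_sites = ("google.com/travel", "kayak.com", "skyscanner.com", "booking.com", "expedia.com")
--     for t in page_tabs:
--         url = t.get("url", "")
--         if not any(h in url for h in heavy_sites):
--             return t
--
--     # Fall back to any page tab
--     if page_tabs:
--         return page_tabs[0]
--
--     # Last resort: anything with a ws URL
--     for t in tabs:
--         if t.get("webSocketDebuggerUrl"):
--             return t
--     return None
-- ===== SOURCE B (Python) =====
-- def _pick_page(tabs):
--     page_tabs = [t for t in tabs if t.get("type") == "page" and t.get("webSocketDebuggerUrl")]
--
--     heavy_sites = ("google.com/travel", "kayak.com", "skyscanner.com", "booking.com", "expedia.com")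
--
--     def priority(t):
--         url = t.get("url", "")
--         if "about:blank" in url or "chrome://newtab" in url or "chrome-untrusted:" in url:
--             return 0
--         if any(h in url for h in heavy_sites):
--             return 2
--         return 1
--
--     if page_tabs:
--         # min is stable: first tab of the best priority bucket
--         return min(page_tabs, key=priority)
--
--     return next((t for t in tabs if t.get("webSocketDebuggerUrl")), None)
-- ===== Notes on version B (the rewrite author's own statement) =====
-- stated objective: simpler
-- what changed: Replaces A's three sequential scans of page_tabs (blank-first, then non-heavy, then head) by a single stable min over a 3-valued priority key, with one fallback scan for ws targets.
import Mathlib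
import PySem

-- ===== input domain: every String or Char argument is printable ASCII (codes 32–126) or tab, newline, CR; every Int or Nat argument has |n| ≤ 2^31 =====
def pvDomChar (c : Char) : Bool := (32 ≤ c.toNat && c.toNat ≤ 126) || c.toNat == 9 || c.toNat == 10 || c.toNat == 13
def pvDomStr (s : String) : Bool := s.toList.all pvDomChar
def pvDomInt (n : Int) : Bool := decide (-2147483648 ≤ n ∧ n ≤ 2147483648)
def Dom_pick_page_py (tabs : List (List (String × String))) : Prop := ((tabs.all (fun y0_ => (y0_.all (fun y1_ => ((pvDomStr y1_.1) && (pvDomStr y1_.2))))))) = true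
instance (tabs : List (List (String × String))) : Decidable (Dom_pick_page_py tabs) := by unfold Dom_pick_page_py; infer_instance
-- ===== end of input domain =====

-- B replaces A's three sequential scans of page_tabs by one stable min over a priority key (same cost; simpler shape).

-- ===== PORT A =====
-- dict.get on an association list: first matching key (hand-ported; exact for str-keyed dicts)
def pvGetA (t : List (String × String)) (k : String) : Option String :=
  (t.find? (fun p => p.1 == k)).map (fun p => p.2)

-- truthiness of t.get("webSocketDebuggerUrl"): present with a non-empty value
def pvHasWsA (t : List (String × String)) : Bool :=
  ((pvGetA t "webSocketDebuggerUrl").getD "") != ""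

def pvIsPageA (t : List (String × String)) : Bool :=
  (pvGetA t "type" == some "page") && pvHasWsA t

def pvBlankA (url : String) : Bool :=
  PySem.Str.isIn "about:blank" url || PySem.Str.isIn "chrome://newtab" url ||
    PySem.Str.isIn "chrome-untrusted:" url

def pvHeavySitesA : List String :=
  ["google.com/travel", "kayak.com", "skyscanner.com", "booking.com", "expedia.com"]

def pvHeavyA (url : String) : Bool :=
  pvHeavySitesA.any (fun h => PySem.Str.isIn h url)

def pick_page_py (tabs : List (List (String × String))) : Option (List (String × String)) :=
  let page_tabs := tabs.filter pvIsPageA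
  match page_tabs.find? (fun t => pvBlankA ((pvGetA t "url").getD "")) with
  | some t => some t
  | none =>
    match page_tabs.find? (fun t => !pvHeavyA ((pvGetA t "url").getD "")) with
    | some t => some t
    | none =>
      match page_tabs with
      | t :: _ => some t
      | [] => tabs.find? pvHasWsA

-- ===== PORT B =====
def pvGetB (t : List (String × String)) (k : String) : Option String :=
  (t.find? (fun p => p.1 == k)).map (fun p => p.2)

def pvHasWsB (t : List (String × String)) : Bool :=
  ((pvGetB t "webSocketDebuggerUrl").getD "") != ""

def pvIsPageB (t : List (String × String)) : Bool :=
  (pvGetB t "type" == some "page") && pvHasWsB t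

def pvHeavySitesB : List String :=
  ["google.com/travel", "kayak.com", "skyscanner.com", "booking.com", "expedia.com"]

def pvPriorityB (t : List (String × String)) : Nat :=
  let url := (pvGetB t "url").getD ""
  if PySem.Str.isIn "about:blank" url || PySem.Str.isIn "chrome://newtab" url ||
      PySem.Str.isIn "chrome-untrusted:" url then 0
  else if pvHeavySitesB.any (fun h => PySem.Str.isIn h url) then 2
  else 1

def pick_page_py_alt (tabs : List (List (String × String))) : Option (List (String × String)) :=
  let page_tabs := tabs.filter pvIsPageB
  if page_tabs.isEmpty then
    tabs.find? pvHasWsB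
  else
    PySem.List.min? page_tabs pvPriorityB

-- ===== PRECONDITION & SPEC =====
def Spec_pick_page_py (tabs : List (List (String × String))) (out : Option (List (String × String))) : Prop := out = pick_page_py_alt tabs
instance (tabs : List (List (String × String))) (out : Option (List (String × String))) : Decidable (Spec_pick_page_py tabs out) := by unfold Spec_pick_page_py; infer_instance

-- ===== CLAIM =====
def Claim_equal_pick_page_py : Prop := ∀ (tabs : List (List (String × String))), Dom_pick_page_py tabs → Spec_pick_page_py tabs (pick_page_py tabs)

-- ===== LEMMAS AND PROOFS =====

theorem pvPriorityB_cases (t : List (String × String)) :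
    pvPriorityB t = 0 ∨ pvPriorityB t = 1 ∨ pvPriorityB t = 2 := by
  unfold pvPriorityB; dsimp only; split_ifs <;> simp

theorem pvBlank_eq_prio_zero (t : List (String × String)) :
    pvBlankA ((pvGetA t "url").getD "") = (pvPriorityB t == 0) := by
  unfold pvBlankA pvPriorityB pvGetA pvGetB
  dsimp only
  split_ifs with h h2 <;> simp_all

theorem pvNotHeavy_eq_prio_le_one (t : List (String × String))
    (h : pvPriorityB t ≠ 0) :
    (!pvHeavyA ((pvGetA t "url").getD "")) = decide (pvPriorityB t ≤ 1) := by
  have e : pvHeavyA ((pvGetA t "url").getD "")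
      = pvHeavySitesB.any (fun h => PySem.Str.isIn h ((pvGetB t "url").getD "")) := rfl
  unfold pvPriorityB at *
  dsimp only at *
  split_ifs at * with h1 h2
  · exact absurd rfl h
  · rw [e, h2]; decide
  · have h2' : (pvHeavySitesB.any fun h => PySem.Str.isIn h ((pvGetB t "url").getD "")) = false := by
      simpa using h2
    rw [e, h2']; decide

-- find? only looks at members (no such congruence lemma in this Mathlib; small induction)
theorem find?_congr_mem {α : Type} (l : List α) (p q : α → Bool)
    (h : ∀ a ∈ l, p a = q a) : l.find? p = l.find? q := by
  induction l with
  | nil => rfl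
  | cons x l ih =>
    simp only [List.find?_cons, h x (by simp)]
    split
    · rfl
    · exact ih (fun a ha => h a (by simp [ha]))

-- one step of min?'s running-minimum loop
theorem min?_cons_cons (x y : List (String × String)) (l : List (List (String × String))) :
    PySem.List.min? (x :: y :: l) pvPriorityB
      = PySem.List.min? ((if pvPriorityB y < pvPriorityB x then y else x) :: l) pvPriorityB := by
  by_cases h : pvPriorityB y < pvPriorityB x <;> simp [PySem.List.min?, h]

-- the stable min over the 3-valued priority, characterised as A's find? cascade
theorem min?_char (l : List (List (String × String))) :
    ∀ x, PySem.List.min? (x :: l) pvPriorityB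
    = some (
      if pvPriorityB x = 0 then x else
      match l.find? (fun t => pvPriorityB t == 0) with
      | some b => b
      | none =>
        if pvPriorityB x = 1 then x else
        match l.find? (fun t => pvPriorityB t ≤ 1) with
        | some b => b
        | none => x) := by
  induction l with
  | nil =>
    intro x
    simp only [List.find?_nil, PySem.List.min?, List.foldl_cons, List.foldl_nil]
    split_ifs <;> rfl
  | cons y l ih =>
    intro x
    rw [min?_cons_cons]
    simp only [List.find?_cons]
    rcases pvPriorityB_cases x with hx | hx | hx <;>
      rcases pvPriorityB_cases y with hy | hy | hy
    all_goals simp [ih, hx, hy]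

theorem pick_page_py_spec : Claim_equal_pick_page_py := by
  intro tabs _
  unfold Spec_pick_page_py pick_page_py pick_page_py_alt
  have hfil : tabs.filter pvIsPageA = tabs.filter pvIsPageB := rfl
  rw [hfil]
  cases hl : tabs.filter pvIsPageB with
  | nil => rfl
  | cons x rest =>
    simp only [List.isEmpty_cons, Bool.false_eq_true, if_false, min?_char]
    -- rewrite A's first find? predicate to the priority form
    have hblank : (fun t => pvBlankA ((pvGetA t "url").getD ""))
        = (fun t => pvPriorityB t == 0) := funext pvBlank_eq_prio_zero
    rw [List.find?_cons, List.find?_cons, hblank, pvBlank_eq_prio_zero]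
    rcases pvPriorityB_cases x with hx | hx | hx
    · simp [hx]
    · simp only [hx]
      norm_num
      cases hf : rest.find? (fun t => pvPriorityB t == 0) with
      | some b => simp
      | none =>
        have hnh : (!pvHeavyA ((pvGetA x "url").getD "")) = true := by
          rw [pvNotHeavy_eq_prio_le_one x (by omega)]; simp [hx]
        simp [hnh]
    · simp only [hx]
      norm_num
      cases hf : rest.find? (fun t => pvPriorityB t == 0) with
      | some b => simp
      | none =>
        have hnone : ∀ t ∈ rest, pvPriorityB t ≠ 0 := by
          intro t ht
          have := List.find?_eq_none.mp hf t ht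
          simpa using this
        have hnh : (!pvHeavyA ((pvGetA x "url").getD "")) = false := by
          rw [pvNotHeavy_eq_prio_le_one x (by omega)]; simp [hx]
        have hcong : rest.find? (fun t => !pvHeavyA ((pvGetA t "url").getD ""))
            = rest.find? (fun t => decide (pvPriorityB t ≤ 1)) := by
          apply find?_congr_mem
          intro a ha
          exact pvNotHeavy_eq_prio_le_one a (hnone a ha)
        simp only [hnh, hcong]
        cases List.find? (fun t => decide (pvPriorityB t ≤ 1)) rest <;> simp
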